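-- pv_equiv track=rewrite | github.com/S23Web3/Vault | PROJECTS/bingx-connector-v2/scripts/scrape_bingx_docs.py | _merge_paired_tables
-- ===== SOURCE A (Python) =====
-- def _merge_paired_tables(tables):
--     """Merge paired header+data tables from BingX DOM structure.
--
--     BingX renders each table section as TWO <table> elements:
--     a 1-row header table followed by a multi-row data table.
--     This method detects and merges those pairs.
--     """
--     merged = []
--     i = 0
--     while i < len(tables):
--         table = tables[i]
--         # Strip trailing empty cells from all rows
--         cleaned = []
--         for row in table:
--             stripped = [c for c in row if c.strip()]
--             if stripped:
--                 cleaned.append(stripped)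
--
--         # Check if this is a 1-row header followed by a data table
--         if len(cleaned) == 1 and i + 1 < len(tables):
--             next_table = tables[i + 1]
--             next_cleaned = []
--             for row in next_table:
--                 stripped = [c for c in row if c.strip()]
--                 if stripped:
--                     next_cleaned.append(stripped)
--             # Merge: header row + data rows
--             merged.append(cleaned + next_cleaned)
--             i += 2
--         else:
--             merged.append(cleaned)
--             i += 1
--     return merged
-- ===== SOURCE B (Python) =====
-- def _merge_paired_tables(tables):
--     """State-machine version: one forward pass, no index, no lookahead.
--
--     A 1-row cleaned table is held as a pending header; the next table's
--     cleaned rows are appended to it unconditionally; a trailing pending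
--     header is flushed at the end.
--     """
--     merged = []
--     pending = None
--     for table in tables:
--         rows = [[c for c in row if c.strip()] for row in table]
--         cleaned = [r for r in rows if r]
--         if pending is not None:
--             merged.append(pending + cleaned)
--             pending = None
--         elif len(cleaned) == 1:
--             pending = cleaned
--         else:
--             merged.append(cleaned)
--     if pending is not None:
--         merged.append(pending)
--     return merged
-- ===== Notes on version B (the rewrite author's own statement) =====
-- stated objective: alternative
-- what changed: B replaces A's while-loop with an index and an inline lookahead (i += 2 after a merge) by a single forward fold over the tables carrying a pending-header state: a 1-row cleaned table is held as pending, the next table's cleaned rows are appended to it unconditionally, and a trailing pending header is flushed after the loop.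
import Mathlib
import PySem

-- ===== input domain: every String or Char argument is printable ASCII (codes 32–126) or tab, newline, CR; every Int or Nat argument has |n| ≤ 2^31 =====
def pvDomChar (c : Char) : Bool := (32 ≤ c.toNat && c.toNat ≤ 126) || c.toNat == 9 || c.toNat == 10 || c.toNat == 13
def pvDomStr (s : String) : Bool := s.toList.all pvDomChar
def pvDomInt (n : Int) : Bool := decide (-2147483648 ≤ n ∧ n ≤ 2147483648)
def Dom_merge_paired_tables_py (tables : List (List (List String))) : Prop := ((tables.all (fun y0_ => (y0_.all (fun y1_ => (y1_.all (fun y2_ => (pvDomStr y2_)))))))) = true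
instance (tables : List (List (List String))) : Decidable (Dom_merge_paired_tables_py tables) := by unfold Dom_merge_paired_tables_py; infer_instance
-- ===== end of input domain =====

-- B replaces A's index loop with lookahead by a single forward fold carrying a pending-header state (objective: alternative); A = B proved on Dom.

-- ===== PORT A =====
-- A's inner cleaning loop (appears twice in A, verbatim): accumulate rows whose blank cells
-- were stripped, dropping rows left empty.
def pvCleanA (table : List (List String)) : List (List String) :=
  table.foldl (fun acc row =>
      let stripped := row.filter (fun c => PySem.Str.strip c ≠ "")
      if stripped ≠ [] then acc ++ [stripped] else acc) []

-- Port of A: index loop (as structural recursion on the remaining tables) that cleans the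
-- current table inline and, when it has exactly one row and a next table exists, cleans and
-- consumes the next table too (i += 2).
def merge_paired_tables_py (tables : List (List (List String))) : List (List (List String)) :=
  match tables with
  | [] => []
  | table :: rest =>
    let cleaned := pvCleanA table
    match rest with
    | next_table :: rest' =>
      if cleaned.length = 1 then
        let next_cleaned := pvCleanA next_table
        (cleaned ++ next_cleaned) :: merge_paired_tables_py rest'
      else
        cleaned :: merge_paired_tables_py (next_table :: rest')
    | [] => [cleaned]

-- ===== PORT B =====
-- B's cleaning: blank cells dropped per row (first comprehension), then rows left empty
-- dropped (second comprehension).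
def pvCleanB (table : List (List String)) : List (List String) :=
  (table.map (fun row => row.filter (fun c => PySem.Str.strip c ≠ ""))).filter (fun r => r ≠ [])

-- B's loop body: state = (merged so far, optional pending header).
def pvStepB (st : List (List (List String)) × Option (List (List String)))
    (table : List (List String)) : List (List (List String)) × Option (List (List String)) :=
  let cleaned := pvCleanB table
  match st with
  | (merged, some pending) => (merged ++ [pending ++ cleaned], none)
  | (merged, none) =>
    if cleaned.length = 1 then (merged, some cleaned)
    else (merged ++ [cleaned], none)

def merge_paired_tables_py_alt (tables : List (List (List String))) : List (List (List String)) :=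
  match tables.foldl pvStepB ([], none) with
  | (merged, some pending) => merged ++ [pending]
  | (merged, none) => merged

-- ===== PRECONDITION & SPEC =====
def Spec_merge_paired_tables_py (tables : List (List (List String))) (out : List (List (List String))) : Prop := out = merge_paired_tables_py_alt tables
instance (tables : List (List (List String))) (out : List (List (List String))) : Decidable (Spec_merge_paired_tables_py tables out) := by unfold Spec_merge_paired_tables_py; infer_instance

-- ===== CLAIM (what is proved, stated in full; the proofs are below) =====
def Claim_equal_merge_paired_tables_py : Prop := ∀ (tables : List (List (List String))), Dom_merge_paired_tables_py tables → Spec_merge_paired_tables_py tables (merge_paired_tables_py tables)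

-- ===== LEMMAS AND PROOFS =====
-- A's foldl-style cleaning from any accumulator.
lemma pvCleanA_acc (t : List (List String)) : ∀ (acc : List (List String)),
    t.foldl (fun acc row =>
        let stripped := row.filter (fun c => PySem.Str.strip c ≠ "")
        if stripped ≠ [] then acc ++ [stripped] else acc) acc = acc ++ pvCleanA t := by
  induction t with
  | nil => intro acc; simp [pvCleanA]
  | cons r t ih =>
    intro acc
    unfold pvCleanA
    rw [List.foldl_cons, List.foldl_cons, ih, ih]
    dsimp only
    split_ifs <;> simp

-- A's cleaning loop equals B's map-then-filter cleaning.
lemma cleanA_eq_cleanB (t : List (List String)) : pvCleanA t = pvCleanB t := by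
  induction t with
  | nil => rfl
  | cons r t ih =>
    have h1 : pvCleanA (r :: t) =
        (if r.filter (fun c => PySem.Str.strip c ≠ "") ≠ []
          then [r.filter (fun c => PySem.Str.strip c ≠ "")] else []) ++ pvCleanA t := by
      unfold pvCleanA
      rw [List.foldl_cons, pvCleanA_acc]
      dsimp only
      split_ifs <;> simp [pvCleanA]
    rw [h1, ih]
    unfold pvCleanB
    rw [List.map_cons, List.filter_cons]
    by_cases h : r.filter (fun c => PySem.Str.strip c ≠ "") = []
    · rw [if_neg (by simp_all), if_neg (by simp_all)]
      simp
    · rw [if_pos (by simp_all), if_pos (by simp_all)]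
      simp

-- The fold from any partial 'merged' and no pending header produces merged ++ A's result.
lemma foldB_eq_A (tables : List (List (List String))) :
    ∀ (m : List (List (List String))),
      (match tables.foldl pvStepB (m, none) with
       | (merged, some pending) => merged ++ [pending]
       | (merged, none) => merged) = m ++ merge_paired_tables_py tables := by
  induction tables using merge_paired_tables_py.induct with
  | case1 => intro m; simp [merge_paired_tables_py]
  | case2 t cl nt rest h ih =>
    intro m
    have hc : pvCleanB t = pvCleanA t := (cleanA_eq_cleanB t).symm
    rw [List.foldl_cons, List.foldl_cons]
    have hs1 : pvStepB (m, none) t = (m, some (pvCleanA t)) := by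
      unfold pvStepB; rw [hc]; dsimp only; rw [if_pos h]
    rw [hs1]
    have hs2 : pvStepB (m, some (pvCleanA t)) nt = (m ++ [pvCleanA t ++ pvCleanB nt], none) := by
      unfold pvStepB; rfl
    rw [hs2, ih]
    have hA : merge_paired_tables_py (t :: nt :: rest) =
        (pvCleanA t ++ pvCleanA nt) :: merge_paired_tables_py rest := by
      simp only [merge_paired_tables_py]; rw [if_pos h]
    rw [hA, cleanA_eq_cleanB nt]
    simp
  | case3 t cl nt rest h ih =>
    intro m
    have hc : pvCleanB t = pvCleanA t := (cleanA_eq_cleanB t).symm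
    rw [List.foldl_cons]
    have hs1 : pvStepB (m, none) t = (m ++ [pvCleanA t], none) := by
      unfold pvStepB; rw [hc]; dsimp only; rw [if_neg h]
    rw [hs1, ih]
    have hA : merge_paired_tables_py (t :: nt :: rest) =
        pvCleanA t :: merge_paired_tables_py (nt :: rest) := by
      simp only [merge_paired_tables_py]; rw [if_neg h]
    rw [hA]
    simp
  | case4 t =>
    intro m
    rw [List.foldl_cons]
    have hc : pvCleanB t = pvCleanA t := (cleanA_eq_cleanB t).symm
    by_cases h : (pvCleanA t).length = 1
    · have hs1 : pvStepB (m, none) t = (m, some (pvCleanA t)) := by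
        unfold pvStepB; rw [hc]; dsimp only; rw [if_pos h]
      rw [hs1]; simp [merge_paired_tables_py]
    · have hs1 : pvStepB (m, none) t = (m ++ [pvCleanA t], none) := by
        unfold pvStepB; rw [hc]; dsimp only; rw [if_neg h]
      rw [hs1]; simp [merge_paired_tables_py]

-- ===== VERDICT (by name: the statement is the Claim_ definition above) =====
theorem merge_paired_tables_py_spec : Claim_equal_merge_paired_tables_py := by
  intro tables _
  unfold Spec_merge_paired_tables_py merge_paired_tables_py_alt
  simpa using (foldB_eq_A tables []).symm
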